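-- pv_equiv track=rewrite | github.com/eliottcassidy2000/math | 04-computation/petersen_independence_poly.py | count_matchings
-- ===== SOURCE A (Python) =====
-- from itertools import combinations
--
-- def count_matchings(edges, size):
--     """Count matchings of given size."""
--     count = 0
--     for subset in combinations(edges, size):
--         # Check if edges are disjoint
--         used = set()
--         ok = True
--         for u, v in subset:
--             if u in used or v in used:
--                 ok = False
--                 break
--             used.add(u)
--             used.add(v)
--         if ok:
--             count += 1
--     return count
-- ===== SOURCE B (Python) =====
-- def count_matchings(edges, size):
--     """Count matchings of given size by backtracking on the next included edge."""
--     n = len(edges)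
--
--     def helper(start, remaining, used):
--         if remaining == 0:
--             return 1
--         if remaining > n - start:   # not enough edges left
--             return 0
--         total = 0
--         for j in range(start, n):
--             u, v = edges[j]
--             if u not in used and v not in used:
--                 total += helper(j + 1, remaining - 1, used | {u, v})
--         return total
--
--     return helper(0, size, frozenset())
-- ===== Notes on version B (the rewrite author's own statement) =====
-- stated objective: alternative
-- what changed: B replaces A's generate-all-size-k-combinations-then-filter loop by recursive backtracking on the next included edge, carrying the used-vertex set down and pruning incompatible edges and branches with too few edges left.
import Mathlib
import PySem

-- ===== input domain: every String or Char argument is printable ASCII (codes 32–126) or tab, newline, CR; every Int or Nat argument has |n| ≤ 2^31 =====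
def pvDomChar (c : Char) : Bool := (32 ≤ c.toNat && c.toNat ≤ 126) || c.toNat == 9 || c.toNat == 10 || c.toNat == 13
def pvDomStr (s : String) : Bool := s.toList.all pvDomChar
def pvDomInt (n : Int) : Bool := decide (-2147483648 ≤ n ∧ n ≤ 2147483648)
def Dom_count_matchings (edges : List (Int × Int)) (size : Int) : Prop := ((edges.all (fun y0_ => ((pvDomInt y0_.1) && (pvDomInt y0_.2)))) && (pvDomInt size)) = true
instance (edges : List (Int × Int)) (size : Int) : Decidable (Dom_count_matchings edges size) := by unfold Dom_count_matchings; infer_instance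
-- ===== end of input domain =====

-- B replaces generate-and-filter over all size-k combinations by pruned recursive backtracking
-- over edge indices carrying the used-vertex set; return values agree on all size ≥ 0.

-- ===== PORT A =====
-- itertools.combinations(edges, size): all size-element subsets in order.
def pvCombos (xs : List (Int × Int)) (r : Nat) : List (List (Int × Int)) :=
  match xs, r with
  | _, 0 => [[]]
  | [], _ + 1 => []
  | x :: xs, r + 1 => (pvCombos xs r).map (x :: ·) ++ pvCombos xs (r + 1)

-- A's inner loop: check the subset's edges are vertex-disjoint (with break).
def pvOkLoop (subset : List (Int × Int)) (used : PySem.Set Int) : Bool :=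
  match subset with
  | [] => true
  | (u, v) :: rest =>
    if PySem.Set.contains used u || PySem.Set.contains used v then false
    else pvOkLoop rest ((PySem.Set.add used u).add v)

def count_matchings (edges : List (Int × Int)) (size : Int) : Int :=
  if size < 0 then 0  -- outside Pre_ (Python raises ValueError here)
  else (pvCombos edges size.toNat).foldl
    (fun count subset => if pvOkLoop subset PySem.Set.empty then count + 1 else count) 0

-- ===== PORT B =====
-- helper(start, remaining, used): the Lean port carries the SUFFIX edges[start:] instead of the
-- index start (the loop 'for j in range(start, n)' with edges[j] is the walk down that suffix,
-- and 'remaining > n - start' is 'xs.length < remaining').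
mutual
def pvHelper : List (Int × Int) → Nat → PySem.Set Int → Int
  | _, 0, _ => 1
  | xs, r + 1, used => if xs.length < r + 1 then 0 else pvLoop xs r used
  termination_by xs _ _ => (xs.length, 1)
def pvLoop : List (Int × Int) → Nat → PySem.Set Int → Int
  | [], _, _ => 0
  | (u, v) :: rest, r, used =>
    (if ¬(PySem.Set.contains used u || PySem.Set.contains used v) then
      pvHelper rest r ((PySem.Set.add used u).add v)
    else 0) + pvLoop rest r used
  termination_by xs _ _ => (xs.length, 0)
end

def count_matchings_alt (edges : List (Int × Int)) (size : Int) : Int :=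
  if size < 0 then 0 else pvHelper edges size.toNat PySem.Set.empty

-- ===== PRECONDITION & SPEC =====
-- Pre_ excludes size < 0: there itertools.combinations makes A raise ValueError (B returns 0).
def Pre_count_matchings (edges : List (Int × Int)) (size : Int) : Prop := 0 ≤ size
instance (edges : List (Int × Int)) (size : Int) : Decidable (Pre_count_matchings edges size) := by
  unfold Pre_count_matchings; infer_instance
def pvWitness_count_matchings : (List (Int × Int)) × Int := ([(1, 2), (2, 3), (4, 5)], 2)

def Spec_count_matchings (edges : List (Int × Int)) (size : Int) (out : Int) : Prop :=
  out = count_matchings_alt edges size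
instance (edges : List (Int × Int)) (size : Int) (out : Int) : Decidable (Spec_count_matchings edges size out) := by
  unfold Spec_count_matchings; infer_instance

-- ===== CLAIM (what is proved, stated in full; the proofs are below) =====
def Claim_equal_count_matchings : Prop := ∀ (edges : List (Int × Int)) (size : Int), Dom_count_matchings edges size → Pre_count_matchings edges size → Spec_count_matchings edges size (count_matchings edges size)

-- ===== LEMMAS AND PROOFS =====

theorem foldl_count_eq_countP (l : List (List (Int × Int))) (c : Int) :
    l.foldl (fun count subset => if pvOkLoop subset PySem.Set.empty then count + 1 else count) c
      = c + (l.countP (fun s => pvOkLoop s PySem.Set.empty) : Int) := by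
  induction l generalizing c with
  | nil => simp
  | cons x xs ih =>
    simp only [List.foldl_cons, List.countP_cons, ih]
    split_ifs with h <;> simp <;> omega

theorem pvCombos_eq_nil (xs : List (Int × Int)) (r : Nat) (h : xs.length < r) :
    pvCombos xs r = [] := by
  induction xs generalizing r with
  | nil =>
    cases r with
    | zero => omega
    | succ r => rfl
  | cons x xs ih =>
    cases r with
    | zero => omega
    | succ r =>
      simp only [pvCombos]
      rw [ih r (by simp at h; omega), ih (r + 1) (by simp at h; omega)]
      rfl

theorem pvHelper_eq_of_loop (xs : List (Int × Int))
    (hL : ∀ (r : Nat) (used : PySem.Set Int),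
      pvLoop xs r used = ((pvCombos xs (r + 1)).countP (fun s => pvOkLoop s used) : Int))
    (r : Nat) (used : PySem.Set Int) :
    pvHelper xs r used = ((pvCombos xs r).countP (fun s => pvOkLoop s used) : Int) := by
  cases r with
  | zero =>
    cases xs <;> simp [pvHelper, pvCombos, pvOkLoop]
  | succ r =>
    rw [pvHelper]
    by_cases h : xs.length < r + 1
    · rw [pvCombos_eq_nil xs (r + 1) h]
      simp [h]
    · simp only [h, if_false]
      exact hL r used

theorem pvLoop_eq_countP (xs : List (Int × Int)) (r : Nat) (used : PySem.Set Int) :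
    pvLoop xs r used = ((pvCombos xs (r + 1)).countP (fun s => pvOkLoop s used) : Int) := by
  induction xs generalizing r used with
  | nil => simp [pvLoop, pvCombos]
  | cons e rest ih =>
    obtain ⟨u, v⟩ := e
    rw [pvLoop]
    simp only [pvCombos, List.countP_append, List.countP_map]
    push_cast
    rw [← ih r used]
    congr 1
    by_cases h : (PySem.Set.contains used u || PySem.Set.contains used v) = true
    · have h' : u ∈ used ∨ v ∈ used := by simpa using h
      rw [if_neg (by simp; tauto)]
      have hz : List.countP ((fun s => pvOkLoop s used) ∘ ((u, v) :: ·)) (pvCombos rest r) = 0 := by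
        rw [List.countP_eq_zero]
        intro s _
        simp [pvOkLoop]
        tauto
      rw [hz]
      rfl
    · rw [Bool.not_eq_true] at h
      have h' : u ∉ used ∧ v ∉ used := by simpa using h
      rw [if_pos (by simp; exact h')]
      rw [pvHelper_eq_of_loop rest ih r ((PySem.Set.add used u).add v)]
      congr 1
      apply List.countP_congr
      intro s _
      simp [pvOkLoop, h'.1, h'.2]

theorem helper_eq_countP (edges : List (Int × Int)) (r : Nat) (used : PySem.Set Int) :
    pvHelper edges r used
      = ((pvCombos edges r).countP (fun s => pvOkLoop s used) : Int) :=
  pvHelper_eq_of_loop edges (fun r used => pvLoop_eq_countP edges r used) r used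

-- ===== VERDICT (by name: the statement is the Claim_ definition above) =====
theorem count_matchings_spec : Claim_equal_count_matchings := by
  intro edges size _ hpre
  unfold Spec_count_matchings count_matchings count_matchings_alt
  have hnn : ¬ size < 0 := not_lt.mpr hpre
  simp only [hnn, if_false]
  rw [helper_eq_countP, foldl_count_eq_countP]
  simp
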